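-- pv_equiv track=rewrite | github.com/KiranACD/pythontutorials | Project_4/constants.py | remove_quotes
-- ===== SOURCE A (Python) =====
-- def remove_quotes(row):
--     st = []
--     n = len(row)
--     row = list(row)
--     for _ in range(n):
--         if row[_] == '"':
--             if len(st) == 0:
--                 st.append(row[_])
--                 row[_] = ''
--             else:
--                 st.pop(-1)
--                 row[_] = ''
--         elif row[_] == ',':
--             if st:
--                 row[_] = ''
--     return ''.join(row)
-- ===== SOURCE B (Python) =====
-- def remove_quotes(row):
--     parts = row.split('"')
--     return ''.join(seg if i % 2 == 0 else seg.replace(',', '')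
--                    for i, seg in enumerate(parts))
-- ===== Notes on version B (the rewrite author's own statement) =====
-- stated objective: simpler
-- what changed: Replaces A's char-by-char scan with an explicit stack and in-place cell blanking by splitting the string on the quote character and comma-stripping the odd (inside-quotes) segments before joining.
import Mathlib
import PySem

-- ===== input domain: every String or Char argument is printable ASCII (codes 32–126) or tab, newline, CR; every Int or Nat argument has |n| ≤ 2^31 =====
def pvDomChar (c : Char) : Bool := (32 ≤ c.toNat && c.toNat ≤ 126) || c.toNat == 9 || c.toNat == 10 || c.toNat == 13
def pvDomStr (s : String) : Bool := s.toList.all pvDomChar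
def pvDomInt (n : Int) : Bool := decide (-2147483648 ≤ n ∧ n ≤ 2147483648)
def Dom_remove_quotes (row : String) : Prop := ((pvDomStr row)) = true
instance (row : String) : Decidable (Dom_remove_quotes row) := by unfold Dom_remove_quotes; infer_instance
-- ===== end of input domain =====

-- B replaces A's char-by-char stack scan by split-on-quote + strip commas in odd segments (simpler, one segment-level pass).


-- ===== PORT A =====
-- the loop body of A: st is the stack, out the (already processed) cells of the mutated list
def removeQuotesStep (acc : List String × List String) (ch : String) : List String × List String :=
  if ch = "\"" then
    if acc.1.length = 0 then (acc.1 ++ [ch], acc.2 ++ [""])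
    else (acc.1.dropLast, acc.2 ++ [""])
  else if ch = "," then
    if acc.1 ≠ [] then (acc.1, acc.2 ++ [""])
    else (acc.1, acc.2 ++ [ch])
  else (acc.1, acc.2 ++ [ch])

def remove_quotes (row : String) : String :=
  let rowList : List String := row.toList.map (fun c => String.ofList [c])  -- row = list(row)
  PySem.Str.join "" (rowList.foldl removeQuotesStep ([], [])).2             -- ''.join(row)

-- ===== PORT B =====
def remove_quotes_alt (row : String) : String :=
  let parts : List String := (PySem.Str.split? row "\"").getD []            -- row.split('"'); sep ≠ "" so never none
  PySem.Str.join "" ((PySem.List.enumerate parts).map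
    (fun p => if PySem.Int.mod p.1 2 = 0 then p.2 else PySem.Str.replace p.2 "," ""))

-- ===== PRECONDITION & SPEC =====
def Spec_remove_quotes (row : String) (out : String) : Prop := out = remove_quotes_alt row
instance (row : String) (out : String) : Decidable (Spec_remove_quotes row out) := by unfold Spec_remove_quotes; infer_instance

-- ===== CLAIM (what is proved, stated in full; the proofs are below) =====
def Claim_equal_remove_quotes : Prop := ∀ (row : String), Dom_remove_quotes row → Spec_remove_quotes row (remove_quotes row)

-- ===== LEMMAS AND PROOFS =====

-- common denotation: one pass with a Bool 'inside quotes' flag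
def fspec : Bool → List Char → List Char
  | _, [] => []
  | b, c :: cs =>
      if c = '"' then fspec (!b) cs
      else if b && (c == ',') then fspec b cs
      else c :: fspec b cs

-- A's stack is [] outside quotes, ["\""] inside
def stOf (b : Bool) : List String := if b then ["\""] else []

-- the value of row.split('"') as a simple structural recursion
def mySplit : List Char → List (List Char)
  | [] => [[]]
  | c :: cs => if c = '"' then [] :: mySplit cs else (mySplit cs).modifyHead (c :: ·)

-- B's segment-level processing: strip commas from every other segment
def flattenAlt : Bool → List (List Char) → List Char
  | _, [] => []
  | b, p :: ps => (if b then p.filter (fun c => !(c == ',')) else p) ++ flattenAlt (!b) ps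

lemma ofList_singleton_eq_iff (c : Char) (s : String) : String.ofList [c] = s ↔ [c] = s.toList := by
  constructor
  · intro h; rw [← h]; simp
  · intro h; rw [h]; simp

lemma joinEmpty (parts : List (List Char)) : PySem.Chars.join [] parts = parts.flatten := by
  induction parts with
  | nil => simp [PySem.Chars.join_nil]
  | cons p rest ih =>
    cases rest with
    | nil => simp [PySem.Chars.join_singleton]
    | cons q rest' => rw [PySem.Chars.join_cons_cons]; simp_all

lemma replace_go_comma : ∀ (l : List Char) (fuel : Nat) (acc : List Char), l.length ≤ fuel →
    PySem.Chars.replace.go [','] [] fuel l acc = acc.reverse ++ l.filter (fun c => !(c == ',')) := by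
  intro l
  induction l with
  | nil =>
    intro fuel acc _
    cases fuel <;> simp [PySem.Chars.replace.go]
  | cons c t ih =>
    intro fuel acc hle
    cases fuel with
    | zero => simp at hle
    | succ f =>
      by_cases hc : c = ','
      · subst hc
        rw [show PySem.Chars.replace.go [','] [] (f+1) (','::t) acc
              = PySem.Chars.replace.go [','] [] f t acc by
            simp [PySem.Chars.replace.go, List.isPrefixOf]]
        rw [ih f acc (by simpa using hle)]
        simp
      · rw [show PySem.Chars.replace.go [','] [] (f+1) (c::t) acc
              = PySem.Chars.replace.go [','] [] f t (c :: acc) by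
            simp [PySem.Chars.replace.go, List.isPrefixOf, Ne.symm hc]]
        rw [ih f (c :: acc) (by simpa using hle)]
        simp [hc]

lemma replace_comma (l : List Char) :
    PySem.Chars.replace l [','] [] = l.filter (fun c => !(c == ',')) := by
  rw [show PySem.Chars.replace l [','] [] = PySem.Chars.replace.go [','] [] l.length l [] by
        simp [PySem.Chars.replace]]
  simpa using replace_go_comma l l.length [] le_rfl

lemma mySplit_ne_nil (cs : List Char) : mySplit cs ≠ [] := by
  cases cs with
  | nil => simp [mySplit]
  | cons c t =>
    simp only [mySplit]
    split
    · simp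
    · cases h : mySplit t with
      | nil => exact absurd h (mySplit_ne_nil t)
      | cons p ps => simp [h]

lemma splitOn_go_quote : ∀ (l : List Char) (fuel : Nat) (cur : List Char) (acc : List (List Char)),
    l.length ≤ fuel →
    PySem.Chars.splitOn.go ['"'] fuel l cur acc
      = acc.reverse ++ (match mySplit l with
          | [] => [cur.reverse]
          | p :: ps => (cur.reverse ++ p) :: ps) := by
  intro l
  induction l with
  | nil =>
    intro fuel cur acc _
    cases fuel <;> simp [PySem.Chars.splitOn.go, mySplit]
  | cons c t ih =>
    intro fuel cur acc hle
    cases fuel with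
    | zero => simp at hle
    | succ f =>
      by_cases hc : c = '"'
      · subst hc
        rw [show PySem.Chars.splitOn.go ['"'] (f+1) ('"'::t) cur acc
              = PySem.Chars.splitOn.go ['"'] f t [] (cur.reverse :: acc) by
            simp [PySem.Chars.splitOn.go, List.isPrefixOf]]
        rw [ih f [] (cur.reverse :: acc) (by simpa using hle)]
        cases h : mySplit t with
        | nil => exact absurd h (mySplit_ne_nil t)
        | cons p ps => simp [mySplit, h]
      · rw [show PySem.Chars.splitOn.go ['"'] (f+1) (c::t) cur acc
              = PySem.Chars.splitOn.go ['"'] f t (c :: cur) acc by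
            simp [PySem.Chars.splitOn.go, List.isPrefixOf, Ne.symm hc]]
        rw [ih f (c :: cur) acc (by simpa using hle)]
        cases h : mySplit t with
        | nil => exact absurd h (mySplit_ne_nil t)
        | cons p ps => simp [mySplit, hc, h]

lemma splitOn_quote (cs : List Char) : PySem.Chars.splitOn cs ['"'] = mySplit cs := by
  rw [show PySem.Chars.splitOn cs ['"'] = PySem.Chars.splitOn.go ['"'] (cs.length + 1) cs [] [] by
        simp [PySem.Chars.splitOn]]
  rw [splitOn_go_quote cs (cs.length + 1) [] [] (by omega)]
  cases h : mySplit cs with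
  | nil => exact absurd h (mySplit_ne_nil cs)
  | cons p ps => simp

lemma flattenAlt_mySplit : ∀ (cs : List Char) (b : Bool), flattenAlt b (mySplit cs) = fspec b cs := by
  intro cs
  induction cs with
  | nil => intro b; cases b <;> simp [mySplit, flattenAlt, fspec]
  | cons c t ih =>
    intro b
    by_cases hc : c = '"'
    · subst hc
      have h1 : mySplit ('"' :: t) = [] :: mySplit t := by simp [mySplit]
      have h2 : fspec b ('"' :: t) = fspec (!b) t := by simp [fspec]
      rw [h1, h2, ← ih (!b)]
      cases b <;> simp [flattenAlt]
    · cases h : mySplit t with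
      | nil => exact absurd h (mySplit_ne_nil t)
      | cons p ps =>
        have hrec := ih b
        rw [h] at hrec
        simp only [mySplit, if_neg hc, h, List.modifyHead, flattenAlt, fspec, if_neg hc]
        cases b with
        | false =>
          simp only [Bool.false_and, if_neg (by simp : ¬ (false = true))] at *
          simp [flattenAlt] at hrec ⊢
          simp [hrec]
        | true =>
          by_cases hcm : c = ','
          · subst hcm
            simp only [flattenAlt] at hrec ⊢
            simp at hrec ⊢
            simp [hrec]
          · simp only [flattenAlt] at hrec ⊢
            simp [hcm] at hrec ⊢
            simp [hrec]

lemma foldA : ∀ (cs : List Char) (b : Bool) (out : List String),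
    ((((cs.map (fun c => String.ofList [c])).foldl removeQuotesStep (stOf b, out)).2.map String.toList)).flatten
      = (out.map String.toList).flatten ++ fspec b cs := by
  intro cs
  induction cs with
  | nil => intro b out; simp [fspec]
  | cons c t ih =>
    intro b out
    simp only [List.map_cons, List.foldl_cons]
    by_cases hc : c = '"'
    · subst hc
      have hch : String.ofList ['"'] = "\"" := by decide
      cases b with
      | false =>
        have hstep : removeQuotesStep (stOf false, out) (String.ofList ['"'])
            = (stOf true, out ++ [""]) := by
          simp [removeQuotesStep, stOf, hch]
        rw [hstep, ih true (out ++ [""])]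
        simp [fspec]
      | true =>
        have hstep : removeQuotesStep (stOf true, out) (String.ofList ['"'])
            = (stOf false, out ++ [""]) := by
          simp [removeQuotesStep, stOf, hch]
        rw [hstep, ih false (out ++ [""])]
        simp [fspec]
    · have hne : ¬ (String.ofList [c] = "\"") := by
        rw [ofList_singleton_eq_iff]
        intro h
        apply hc
        have : ['"'] = ("\"" : String).toList := by decide
        rw [← this] at h
        exact List.head_eq_of_cons_eq h
      by_cases hcm : c = ','
      · subst hcm
        have hcomma : String.ofList [','] = "," := by decide
        cases b with
        | false =>
          have hstep : removeQuotesStep (stOf false, out) (String.ofList [','])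
              = (stOf false, out ++ [String.ofList [',']]) := by
            simp [removeQuotesStep, stOf, hne, hcomma]
          rw [hstep, ih false (out ++ [String.ofList [',']])]
          simp [fspec]
        | true =>
          have hstep : removeQuotesStep (stOf true, out) (String.ofList [','])
              = (stOf true, out ++ [""]) := by
            simp [removeQuotesStep, stOf, hne, hcomma]
          rw [hstep, ih true (out ++ [""])]
          simp [fspec]
      · have hnc : ¬ (String.ofList [c] = ",") := by
          rw [ofList_singleton_eq_iff]
          intro h
          apply hcm
          have : [','] = ("," : String).toList := by decide
          rw [← this] at h
          exact List.head_eq_of_cons_eq h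
        have hstep : removeQuotesStep (stOf b, out) (String.ofList [c])
            = (stOf b, out ++ [String.ofList [c]]) := by
          simp [removeQuotesStep, hne, hnc]
        rw [hstep, ih b (out ++ [String.ofList [c]])]
        cases b <;> simp [fspec, hc, hcm]

lemma enumB : ∀ (parts : List (List Char)) (n : Nat),
    ((((PySem.List.enumerate (parts.map String.ofList) (n : Int)).map
        (fun p => if PySem.Int.mod p.1 2 = 0 then p.2 else PySem.Str.replace p.2 "," "")).map String.toList)).flatten
      = flattenAlt (decide (n % 2 = 1)) parts := by
  intro parts
  induction parts with
  | nil => intro n; simp [PySem.List.enumerate, flattenAlt]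
  | cons p ps ih =>
    intro n
    have henum : PySem.List.enumerate ((p :: ps).map String.ofList) (n : Int)
        = ((n : Int), String.ofList p) :: PySem.List.enumerate (ps.map String.ofList) ((n : Int) + 1) := by
      simp [PySem.List.enumerate]
    rw [henum]
    have hcast : ((n : Int) + 1) = ((n + 1 : Nat) : Int) := by push_cast; ring
    rw [hcast]
    have hmod : PySem.Int.mod ((n : Nat) : Int) 2 = (((n % 2 : Nat)) : Int) := by
      have := PySem.Int.mod_natCast n 2
      simpa using this
    by_cases hpar : n % 2 = 0
    · have hcond : PySem.Int.mod ((n : Nat) : Int) 2 = 0 := by rw [hmod, hpar]; simp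
      have hflag : decide (n % 2 = 1) = false := by simp [hpar]
      have hflag2 : decide ((n + 1) % 2 = 1) = true := by
        simp [Nat.add_mod, hpar]
      simp only [List.map_cons, hcond, if_pos rfl, List.flatten_cons]
      rw [ih (n + 1), hflag, hflag2]
      simp [flattenAlt]
    · have hn1 : n % 2 = 1 := by omega
      have hcond : ¬ (PySem.Int.mod ((n : Nat) : Int) 2 = 0) := by
        rw [hmod, hn1]; simp
      have hflag : decide (n % 2 = 1) = true := by simp [hn1]
      have hflag2 : decide ((n + 1) % 2 = 1) = false := by
        simp [Nat.add_mod, hn1]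
      simp only [List.map_cons, if_neg hcond, List.flatten_cons]
      rw [ih (n + 1), hflag, hflag2]
      have hrep : String.toList (PySem.Str.replace (String.ofList p) "," "")
          = p.filter (fun c => !(c == ',')) := by
        rw [PySem.Str.toList_replace]
        have h1 : ("," : String).toList = [','] := by decide
        have h2 : ("" : String).toList = [] := by decide
        rw [h1, h2]
        simp [replace_comma]
      rw [hrep]
      simp [flattenAlt]

lemma strJoin_empty (L : List String) :
    PySem.Str.join "" L = String.ofList ((L.map String.toList).flatten) := by
  have h : PySem.Str.join "" L = String.ofList (PySem.Chars.join ("" : String).toList (L.map String.toList)) := rfl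
  rw [h]
  have h2 : ("" : String).toList = [] := by decide
  rw [h2, joinEmpty]

-- ===== VERDICT (by name: the statement is the Claim_ definition above) =====
theorem remove_quotes_spec : Claim_equal_remove_quotes := by
  intro row _
  unfold Spec_remove_quotes
  unfold remove_quotes remove_quotes_alt
  simp only []
  rw [strJoin_empty, strJoin_empty]
  congr 1
  -- A side
  have hA := foldA row.toList false []
  simp only [stOf, if_neg (by simp : ¬ (false = true)), List.map_nil, List.flatten_nil,
    List.nil_append] at hA
  rw [hA]
  -- B side
  have hsplit : (PySem.Str.split? row "\"").getD []
      = (PySem.Chars.splitOn row.toList ['"']).map String.ofList := by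
    have hsep : ("\"" : String).toList = ['"'] := by decide
    simp [PySem.Str.split?, PySem.Chars.split?, hsep]
  rw [hsplit, splitOn_quote]
  have hB := enumB (mySplit row.toList) 0
  have h0 : ((0 : Nat) : Int) = (0 : Int) := by norm_num
  rw [h0] at hB
  rw [hB]
  have : decide ((0 : Nat) % 2 = 1) = false := by decide
  rw [this, flattenAlt_mySplit]
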